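-- pv_equiv track=rewrite | github.com/uk0/droidrun | droidrun/agent/utils/signatures.py | filter_custom_tools
-- ===== SOURCE A (Python) =====
-- from typing import Any, Dict, List
--
-- def filter_custom_tools(
--     custom_tools: Dict[str, Any],
--     disabled_tools: List[str],
-- ) -> Dict[str, Any]:
--     """Filter custom tools dict by removing disabled tools."""
--     if not custom_tools:
--         return {}
--     if not disabled_tools:
--         return custom_tools.copy()
--     return {k: v for k, v in custom_tools.items() if k not in disabled_tools}
-- ===== SOURCE B (Python) =====
-- def filter_custom_tools(custom_tools, disabled_tools):
--     """Filter custom tools dict by removing disabled tools."""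
--     if not custom_tools:
--         return {}
--     result = custom_tools.copy()
--     for k in disabled_tools:
--         result.pop(k, None)
--     return result
-- ===== Notes on version B (the rewrite author's own statement) =====
-- stated objective: faster
-- what changed: B copies the dict once and drives the loop over disabled_tools, popping each key from the working copy in O(1), instead of A's comprehension over custom_tools with a linear membership test in the disabled list per key.
import Mathlib
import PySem

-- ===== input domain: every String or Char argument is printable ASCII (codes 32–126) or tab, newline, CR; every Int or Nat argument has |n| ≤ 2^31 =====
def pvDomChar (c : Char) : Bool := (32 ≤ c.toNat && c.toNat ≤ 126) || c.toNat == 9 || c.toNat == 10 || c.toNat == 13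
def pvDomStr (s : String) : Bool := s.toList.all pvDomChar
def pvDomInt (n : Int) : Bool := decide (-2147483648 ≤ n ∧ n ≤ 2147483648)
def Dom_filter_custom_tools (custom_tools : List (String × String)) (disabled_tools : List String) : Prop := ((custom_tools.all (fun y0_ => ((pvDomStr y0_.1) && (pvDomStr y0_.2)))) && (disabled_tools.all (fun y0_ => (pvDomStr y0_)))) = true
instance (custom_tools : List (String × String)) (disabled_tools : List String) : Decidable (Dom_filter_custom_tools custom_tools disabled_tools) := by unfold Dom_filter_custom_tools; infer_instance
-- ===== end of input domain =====

-- B copies the dict once and deletes each disabled key from the copy (loop over disabled_tools),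
-- instead of A's comprehension over custom_tools with a membership test; return values are equal.

-- ===== PORT A =====
-- literal port of A: empty-dict guard, empty-disabled guard returning a copy,
-- then the dict comprehension {k: v for k, v in custom_tools.items() if k not in disabled_tools}
def filter_custom_tools (custom_tools : List (String × String)) (disabled_tools : List String) : List (String × String) :=
  if custom_tools.isEmpty then []
  else if disabled_tools.isEmpty then custom_tools
  else custom_tools.filter (fun kv => !(disabled_tools.contains kv.1))

-- ===== PORT B =====
-- dict.pop(k, None): remove the entry with key k from the association list (no-op if absent)
def pvPopKey (d : List (String × String)) (k : String) : List (String × String) :=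
  d.filter (fun kv => !(kv.1 == k))

def filter_custom_tools_alt (custom_tools : List (String × String)) (disabled_tools : List String) : List (String × String) :=
  if custom_tools.isEmpty then []
  else disabled_tools.foldl pvPopKey custom_tools

-- ===== PRECONDITION & SPEC =====
def Spec_filter_custom_tools (custom_tools : List (String × String)) (disabled_tools : List String) (out : List (String × String)) : Prop := out = filter_custom_tools_alt custom_tools disabled_tools
instance (custom_tools : List (String × String)) (disabled_tools : List String) (out : List (String × String)) : Decidable (Spec_filter_custom_tools custom_tools disabled_tools out) := by unfold Spec_filter_custom_tools; infer_instance

-- ===== CLAIM (what is proved, stated in full; the proofs are below) =====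
def Claim_equal_filter_custom_tools : Prop := ∀ (custom_tools : List (String × String)) (disabled_tools : List String), Dom_filter_custom_tools custom_tools disabled_tools → Spec_filter_custom_tools custom_tools disabled_tools (filter_custom_tools custom_tools disabled_tools)

-- ===== LEMMAS AND PROOFS =====

-- the B-side loop over disabled keys computes A's single filter
theorem foldl_pvPopKey_eq_filter (dt : List String) (ct : List (String × String)) :
    dt.foldl pvPopKey ct = ct.filter (fun kv => !(dt.contains kv.1)) := by
  induction dt generalizing ct with
  | nil => simp
  | cons k dt' ih =>
      simp only [List.foldl_cons, ih, pvPopKey, List.filter_filter]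
      apply List.filter_congr
      intro kv _
      by_cases h : kv.1 = k <;> simp [h]

-- ===== VERDICT (by name: the statement is the Claim_ definition above) =====
theorem filter_custom_tools_spec : Claim_equal_filter_custom_tools := by
  intro ct dt _
  unfold Spec_filter_custom_tools filter_custom_tools filter_custom_tools_alt
  by_cases hc : ct.isEmpty
  · simp [hc]
  · by_cases hd : dt.isEmpty
    · rcases List.isEmpty_iff.mp hd with rfl
      simp [hc]
    · simp [hc, hd, foldl_pvPopKey_eq_filter]
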